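-- pv_equiv track=rewrite | github.com/robespierreAlgo/alignfixV2 | backend/py/utils.py | find_all_sublists
-- ===== SOURCE A (Python) =====
-- def find_all_sublists(lst, sublst):
--   sub_len = len(sublst)
--   indices = []
--   for i in range(len(lst) - sub_len + 1):
--       if lst[i:i + sub_len] == sublst:
--           indices.append(i)
--
--   # sort by indicies desc
--   indices.sort(reverse=True)
--   return indices
-- ===== SOURCE B (Python) =====
-- def find_all_sublists(lst, sublst):
--     # Single left-to-right pass simulating the pattern's nondeterministic matching
--     # automaton: `states` holds the lengths of pattern prefixes that match a suffix
--     # of the input read so far; a state reaching m reports an occurrence.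
--     m = len(sublst)
--     if m == 0:
--         return list(range(len(lst), -1, -1))
--     out = []
--     states = []
--     for i, x in enumerate(lst):
--         nxt = [j + 1 for j in states if sublst[j] == x]
--         if sublst[0] == x:
--             nxt.append(1)
--         states = [j for j in nxt if j < m]
--         if m in nxt:
--             out.append(i - m + 1)
--     out.reverse()
--     return out
-- ===== Notes on version B (the rewrite author's own statement) =====
-- stated objective: alternative
-- what changed: B replaces A's check-every-window-then-sort with a single left-to-right pass that simulates the pattern's nondeterministic matching automaton (a worklist of live prefix-match lengths), emits each start index the moment a state reaches the full pattern length, and reverses once at the end instead of sorting.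
import Mathlib
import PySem

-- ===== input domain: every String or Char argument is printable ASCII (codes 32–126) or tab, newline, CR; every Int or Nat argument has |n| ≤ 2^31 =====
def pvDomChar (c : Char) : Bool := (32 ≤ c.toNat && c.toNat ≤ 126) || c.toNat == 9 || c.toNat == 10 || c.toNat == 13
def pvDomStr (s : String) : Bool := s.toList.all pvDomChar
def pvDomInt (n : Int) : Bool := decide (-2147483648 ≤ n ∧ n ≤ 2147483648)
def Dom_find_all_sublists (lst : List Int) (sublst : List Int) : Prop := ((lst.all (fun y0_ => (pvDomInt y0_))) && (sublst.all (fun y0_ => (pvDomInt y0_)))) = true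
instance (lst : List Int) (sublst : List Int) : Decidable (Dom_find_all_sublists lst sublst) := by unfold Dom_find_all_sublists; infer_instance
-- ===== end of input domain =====

-- B drops A's check-every-window-then-sort approach: one left-to-right pass simulating the
-- pattern's nondeterministic matching automaton (a worklist of live prefix-match lengths),
-- emitting start indices as states complete and reversing once at the end instead of
-- sorting (objective: alternative algorithm, same worst-case cost).

-- ===== PORT A =====
def find_all_sublists (lst : List Int) (sublst : List Int) : List Int :=
  let sub_len : Int := (sublst.length : Int)
  let indices :=
    (PySem.List.pyRange 0 ((lst.length : Int) - sub_len + 1) 1).foldl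
      (fun acc i =>
        if PySem.List.slice lst (some i) (some (i + sub_len)) = sublst then acc ++ [i] else acc)
      []
  PySem.List.sorted indices (fun x => x) true

-- ===== PORT B =====
-- the body of Source B's for-loop as a named helper; sublst[j] is read with pyGetD: every j the
-- loop reaches satisfies 0 ≤ j < len(sublst), so the default is never read (exact there).
def pvStepB (sublst : List Int) (st : List Int × List Int) (p : Int × Int) : List Int × List Int :=
  let m : Int := (sublst.length : Int)
  let nxt := ((st.2.filter (fun j => PySem.List.pyGetD sublst j 0 == p.2)).map (fun j => j + 1))
    ++ (if PySem.List.pyGetD sublst 0 0 == p.2 then [1] else [])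
  ((if m ∈ nxt then st.1 ++ [p.1 - m + 1] else st.1), nxt.filter (fun j => decide (j < m)))

def find_all_sublists_alt (lst : List Int) (sublst : List Int) : List Int :=
  if sublst.length == 0 then
    PySem.List.pyRange (lst.length : Int) (-1) (-1)
  else
    (((PySem.List.enumerate lst 0).foldl (pvStepB sublst) ([], [])).1).reverse

-- ===== PRECONDITION & SPEC =====
def Spec_find_all_sublists (lst : List Int) (sublst : List Int) (out : List Int) : Prop := out = find_all_sublists_alt lst sublst
instance (lst : List Int) (sublst : List Int) (out : List Int) : Decidable (Spec_find_all_sublists lst sublst out) := by unfold Spec_find_all_sublists; infer_instance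

-- ===== CLAIM (what is proved, stated in full; the proofs are below) =====
def Claim_equal_find_all_sublists : Prop := ∀ (lst : List Int) (sublst : List Int), Dom_find_all_sublists lst sublst → Spec_find_all_sublists lst sublst (find_all_sublists lst sublst)

-- ===== LEMMAS AND PROOFS =====

-- "the last j elements of lst[:p] equal sublst[:j]" — the partial-match states of B's automaton
def pvPartial (lst sub : List Int) (p j : Nat) : Bool :=
  decide (j ≤ p) && (List.range j).all (fun t => lst.getD (p - j + t) 0 == sub.getD t 0)

lemma pvPartial_iff (lst sub : List Int) (p j : Nat) :
    pvPartial lst sub p j = true ↔ j ≤ p ∧ ∀ t, t < j → lst.getD (p - j + t) 0 = sub.getD t 0 := by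
  simp [pvPartial, List.all_eq_true]

lemma pvPartial_zero (lst sub : List Int) (p : Nat) : pvPartial lst sub p 0 = true := by
  simp [pvPartial]

lemma pvPartial_succ_iff (lst sub : List Int) (p j : Nat) :
    pvPartial lst sub (p + 1) (j + 1) = true ↔
      pvPartial lst sub p j = true ∧ lst.getD p 0 = sub.getD j 0 := by
  simp only [pvPartial_iff]
  constructor
  · rintro ⟨hjp, h⟩
    have hjp' : j ≤ p := by omega
    refine ⟨⟨hjp', ?_⟩, ?_⟩
    · intro t ht
      have := h t (by omega)
      rwa [show p + 1 - (j + 1) + t = p - j + t by omega] at this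
    · have := h j (by omega)
      rwa [show p + 1 - (j + 1) + j = p by omega] at this
  · rintro ⟨⟨hjp, h⟩, hlast⟩
    refine ⟨by omega, ?_⟩
    intro t ht
    rcases Nat.lt_succ_iff_lt_or_eq.mp ht with ht' | rfl
    · have := h t ht'
      rwa [show p + 1 - (j + 1) + t = p - j + t by omega]
    · rwa [show p + 1 - (t + 1) + t = p by omega]

lemma pvPartial_false_of_lt (lst sub : List Int) (p j : Nat) (h : p < j) :
    pvPartial lst sub p j = false := by
  simp [pvPartial, Nat.not_le.mpr h]

-- a full match ending at position s + m is exactly A's slice test at start s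
lemma pvFull_iff (lst sub : List Int) (s : Nat) (hs : s + sub.length ≤ lst.length) :
    ((lst.drop s).take sub.length = sub) ↔ pvPartial lst sub (s + sub.length) sub.length = true := by
  rw [pvPartial_iff]
  have hlen : ((lst.drop s).take sub.length).length = sub.length := by
    simp [List.length_take, List.length_drop]; omega
  constructor
  · intro h
    refine ⟨by omega, ?_⟩
    intro t ht
    have h1 : s + sub.length - sub.length + t = s + t := by omega
    rw [h1]
    have h2 : lst.getD (s + t) 0 = ((lst.drop s).take sub.length).getD t 0 := by
      rw [List.getD_eq_getElem _ _ (by omega), List.getD_eq_getElem _ _ (by rw [hlen]; omega)]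
      simp [List.getElem_take, List.getElem_drop]
    rw [h2, h]
  · rintro ⟨-, h⟩
    apply List.ext_getElem (by omega)
    intro t ht1 ht2
    have := h t (by omega)
    rw [show s + sub.length - sub.length + t = s + t by omega] at this
    rw [List.getD_eq_getElem _ _ (by omega), List.getD_eq_getElem _ _ ht2] at this
    simpa [List.getElem_take, List.getElem_drop] using this

-- invariant carried by B's loop: `states` holds exactly the live partial-match lengths
def pvInv (lst sub : List Int) (p : Nat) (states : List Int) : Prop :=
  ∀ j : Int, j ∈ states ↔ ∃ jn : Nat, j = (jn : Int) ∧ 1 ≤ jn ∧ jn < sub.length ∧ pvPartial lst sub p jn = true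

-- the ascending list of start indices B emits for match ends in [p, lst.length)
def pvEnds (lst sub : List Int) (p : Nat) : List Int :=
  ((((List.range (lst.length - p)).map (fun k => p + k)).filter
      (fun e => pvPartial lst sub (e + 1) sub.length)).map
    (fun (e : Nat) => (e : Int) - (sub.length : Int) + 1))

lemma pvEnds_nil (lst sub : List Int) (p : Nat) (h : lst.length ≤ p) : pvEnds lst sub p = [] := by
  simp [pvEnds, Nat.sub_eq_zero_of_le h]

lemma pvEnds_cons (lst sub : List Int) (p : Nat) (h : p < lst.length) :
    pvEnds lst sub p =
      (if pvPartial lst sub (p + 1) sub.length then [(p : Int) - (sub.length : Int) + 1] else [])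
        ++ pvEnds lst sub (p + 1) := by
  have h1 : lst.length - p = (lst.length - (p + 1)) + 1 := by omega
  rw [pvEnds, h1, List.range_succ_eq_map, List.map_cons, List.map_map, List.filter_cons]
  have h2 : ((fun k => p + k) ∘ Nat.succ) = fun k => (p + 1) + k := by
    funext k; simp [Function.comp]; omega
  rw [h2]
  by_cases hc : pvPartial lst sub (p + 1) sub.length = true
  · simp [pvEnds, hc]
  · simp only [Bool.not_eq_true] at hc
    simp [pvEnds, hc]

-- membership in B's `nxt` list, characterised through the invariant
lemma pvMem_nxt (lst sub : List Int) (p : Nat) (states : List Int) (hm : 0 < sub.length)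
    (hp : p < lst.length) (hinv : pvInv lst sub p states) (j : Int) :
    (j ∈ ((states.filter (fun j => PySem.List.pyGetD sub j 0 == lst[p])).map (fun j => j + 1))
          ++ (if PySem.List.pyGetD sub 0 0 == lst[p] then [1] else [])) ↔
      ∃ jn : Nat, j = (jn : Int) ∧ 1 ≤ jn ∧ jn ≤ sub.length ∧ pvPartial lst sub (p + 1) jn = true := by
  have hget : lst.getD p 0 = lst[p] := List.getD_eq_getElem _ _ hp
  simp only [List.mem_append, List.mem_map, List.mem_filter, beq_iff_eq]
  constructor
  · rintro (⟨j0, ⟨hj0s, hj0x⟩, rfl⟩ | hone)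
    · rcases (hinv j0).mp hj0s with ⟨j0n, rfl, h1, h2, hpart⟩
      refine ⟨j0n + 1, by push_cast; ring, by omega, by omega, ?_⟩
      rw [pvPartial_succ_iff]
      refine ⟨hpart, ?_⟩
      rw [hget]
      rw [PySem.List.pyGetD_natCast] at hj0x
      exact hj0x.symm ▸ rfl
    · have hz : PySem.List.pyGetD sub 0 0 = lst[p] ∧ j = 1 := by
        by_cases hc : PySem.List.pyGetD sub 0 0 = lst[p] <;> simp [hc] at hone
        exact ⟨hc, hone⟩
      obtain ⟨hzx, rfl⟩ := hz
      refine ⟨1, by norm_num, le_refl _, by omega, ?_⟩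
      rw [show (1 : Nat) = 0 + 1 from rfl, pvPartial_succ_iff]
      refine ⟨pvPartial_zero _ _ _, ?_⟩
      rw [hget]
      have h0 : PySem.List.pyGetD sub ((0 : Nat) : Int) 0 = sub.getD 0 0 := PySem.List.pyGetD_natCast _ _ _
      rw [Nat.cast_zero] at h0
      rw [← hzx]; exact h0
  · rintro ⟨jn, rfl, h1, h2, hpart⟩
    obtain ⟨jn', rfl⟩ : ∃ jn', jn = jn' + 1 := ⟨jn - 1, by omega⟩
    rw [pvPartial_succ_iff] at hpart
    obtain ⟨hpart', hx⟩ := hpart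
    by_cases hz : jn' = 0
    · subst hz
      right
      have h0 : PySem.List.pyGetD sub ((0 : Nat) : Int) 0 = sub.getD 0 0 := PySem.List.pyGetD_natCast _ _ _
      rw [Nat.cast_zero] at h0
      rw [h0, ← hget, hx.symm]
      simp
    · left
      refine ⟨(jn' : Int), ⟨(hinv _).mpr ⟨jn', rfl, by omega, by omega, hpart'⟩, ?_⟩, by push_cast; ring⟩
      rw [PySem.List.pyGetD_natCast, ← hget, hx]

lemma pvStep_fst (lst sub : List Int) (p : Nat) (out states : List Int) (hm : 0 < sub.length)
    (hp : p < lst.length) (hinv : pvInv lst sub p states) :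
    (pvStepB sub (out, states) ((p : Int), lst[p])).1 =
      if pvPartial lst sub (p + 1) sub.length then out ++ [(p : Int) - (sub.length : Int) + 1] else out := by
  have hmem := pvMem_nxt lst sub p states hm hp hinv ((sub.length : Nat) : Int)
  simp only [pvStepB]
  by_cases hc : pvPartial lst sub (p + 1) sub.length = true
  · rw [if_pos (hmem.mpr ⟨sub.length, rfl, by omega, le_refl _, hc⟩), if_pos hc]
  · rw [if_neg, if_neg hc]
    intro hmm
    rcases hmem.mp hmm with ⟨jn, hj, h1, h2, hpart⟩
    have : jn = sub.length := by exact_mod_cast hj.symm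
    exact hc (this ▸ hpart)

lemma pvStep_inv (lst sub : List Int) (p : Nat) (out states : List Int) (hm : 0 < sub.length)
    (hp : p < lst.length) (hinv : pvInv lst sub p states) :
    pvInv lst sub (p + 1) (pvStepB sub (out, states) ((p : Int), lst[p])).2 := by
  intro j
  simp only [pvStepB, List.mem_filter, decide_eq_true_eq]
  rw [pvMem_nxt lst sub p states hm hp hinv j]
  constructor
  · rintro ⟨⟨jn, rfl, h1, h2, hpart⟩, hlt⟩
    exact ⟨jn, rfl, h1, by exact_mod_cast hlt, hpart⟩
  · rintro ⟨jn, rfl, h1, h2, hpart⟩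
    exact ⟨⟨jn, rfl, h1, by omega, hpart⟩, by exact_mod_cast h2⟩

lemma pvLoop (lst sub : List Int) (hm : 0 < sub.length) :
    ∀ (k p : Nat) (out states : List Int), k = lst.length - p → p ≤ lst.length →
      pvInv lst sub p states →
      (((PySem.List.enumerate (lst.drop p) (p : Int)).foldl (pvStepB sub) (out, states)).1)
        = out ++ pvEnds lst sub p := by
  intro k
  induction k with
  | zero =>
    intro p out states hk hple hinv
    have hpe : lst.length ≤ p := by omega
    rw [List.drop_of_length_le hpe]
    simp [PySem.List.enumerate, pvEnds_nil lst sub p hpe]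
  | succ k ih =>
    intro p out states hk hple hinv
    have hp : p < lst.length := by omega
    rw [List.drop_eq_getElem_cons hp, PySem.List.enumerate_cons, List.foldl_cons]
    have hstep1 := pvStep_fst lst sub p out states hm hp hinv
    have hstep2 := pvStep_inv lst sub p out states hm hp hinv
    set st' := pvStepB sub (out, states) ((p : Int), lst[p]) with hst'
    have heta : st' = (st'.1, st'.2) := rfl
    have hcast : ((p : Int) + 1) = ((p + 1 : Nat) : Int) := by push_cast; ring
    rw [heta, hcast, ih (p + 1) st'.1 st'.2 (by omega) (by omega) hstep2]
    rw [hstep1, pvEnds_cons lst sub p hp]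
    by_cases hc : pvPartial lst sub (p + 1) sub.length = true
    · simp [hc]
    · simp only [Bool.not_eq_true] at hc; simp [hc]

-- A's result is the reverse of the ascending filter of matching start positions
lemma pvA_eq (lst sub : List Int) :
    find_all_sublists lst sub =
      ((PySem.List.pyRange 0 ((lst.length : Int) - (sub.length : Int) + 1) 1).filter
        (fun i => decide (PySem.List.slice lst (some i) (some (i + (sub.length : Int))) = sub))).reverse := by
  simp only [find_all_sublists]
  rw [PySem.List.foldl_append_ite_eq_filter
        (fun i => PySem.List.slice lst (some i) (some (i + (sub.length : Int))) = sub)]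
  rw [List.nil_append]
  exact PySem.List.sorted_rev_eq_of_perm_of_pairwise_gt _ _ _ (List.reverse_perm _)
    (List.pairwise_reverse.mpr ((PySem.List.pairwise_lt_pyRange_one _ _).filter _))

-- A's ascending filter is exactly B's emitted list (nonempty pattern)
lemma pvAsc_eq_ends (lst sub : List Int) (hm : 0 < sub.length) :
    (PySem.List.pyRange 0 ((lst.length : Int) - (sub.length : Int) + 1) 1).filter
        (fun i => decide (PySem.List.slice lst (some i) (some (i + (sub.length : Int))) = sub))
      = pvEnds lst sub 0 := by
  by_cases hn : sub.length ≤ lst.length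
  · have hcast : (lst.length : Int) - (sub.length : Int) + 1 = ((lst.length - sub.length + 1 : Nat) : Int) := by
      push_cast [hn]; ring
    rw [hcast, PySem.List.pyRange_zero_natCast, List.filter_map]
    have hLf : ∀ i ∈ List.range (lst.length - sub.length + 1),
        ((fun i => decide (PySem.List.slice lst (some i) (some (i + (sub.length : Int))) = sub)) ∘ (fun k : Nat => (k : Int))) i
          = pvPartial lst sub (i + sub.length) sub.length := by
      intro i hi
      rw [List.mem_range] at hi
      simp only [Function.comp]
      rw [PySem.List.slice_natCast_add]
      by_cases hc : pvPartial lst sub (i + sub.length) sub.length = true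
      · simp [((pvFull_iff lst sub i (by omega)).mpr hc), hc]
      · simp only [Bool.not_eq_true] at hc
        rw [hc, decide_eq_false_iff_not]
        intro hsl
        rw [pvFull_iff lst sub i (by omega)] at hsl
        simp [hsl] at hc
    rw [List.filter_congr hLf]
    have hz : (List.range (sub.length - 1)).filter (fun e => pvPartial lst sub (e + 1) sub.length) = [] := by
      rw [List.filter_eq_nil_iff]
      intro e he
      rw [List.mem_range] at he
      simp [pvPartial_false_of_lt lst sub (e + 1) sub.length (by omega)]
    have hc2 : ∀ k ∈ List.range (lst.length - sub.length + 1),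
        ((fun e => pvPartial lst sub (e + 1) sub.length) ∘ (fun x => sub.length - 1 + x)) k
          = pvPartial lst sub (k + sub.length) sub.length := by
      intro k hk
      simp only [Function.comp]
      rw [show sub.length - 1 + k + 1 = k + sub.length by omega]
    have hid : (List.range (lst.length - 0)).map (fun k => 0 + k)
        = List.range ((sub.length - 1) + (lst.length - sub.length + 1)) := by
      have h' : lst.length - 0 = (sub.length - 1) + (lst.length - sub.length + 1) := by omega
      simp [h']
    have hR : pvEnds lst sub 0
        = ((List.range (lst.length - sub.length + 1)).filter
            (fun k => pvPartial lst sub (k + sub.length) sub.length)).map (fun k : Nat => (k : Int)) := by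
      rw [pvEnds, hid, List.range_add, List.filter_append, hz, List.nil_append,
          List.filter_map, List.filter_congr hc2, List.map_map]
      apply List.map_congr_left
      intro k hk
      simp only [Function.comp]
      have hck : ((sub.length - 1 + k : Nat) : Int) = (sub.length : Int) - 1 + (k : Int) := by
        push_cast [hm]; ring
      rw [hck]; ring
    rw [hR]
  · have h0 : (lst.length : Int) - (sub.length : Int) + 1 ≤ 0 := by
      omega
    rw [PySem.List.pyRange_one_eq_nil h0]
    rw [pvEnds]
    have hz : (((List.range (lst.length - 0)).map (fun k => 0 + k)).filter
        (fun e => pvPartial lst sub (e + 1) sub.length)) = [] := by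
      rw [List.filter_eq_nil_iff]
      intro e he
      simp only [List.mem_map, List.mem_range] at he
      obtain ⟨k, hk, rfl⟩ := he
      simp only [Nat.zero_add]
      simp [pvPartial_false_of_lt lst sub (k + 1) sub.length (by omega)]
    rw [hz]
    simp

-- ===== VERDICT (by name: the statement is the Claim_ definition above) =====
theorem find_all_sublists_spec : Claim_equal_find_all_sublists := by
  intro lst sub _
  unfold Spec_find_all_sublists
  by_cases hm : sub.length = 0
  · have hsub : sub = [] := List.length_eq_zero_iff.mp hm
    subst hsub
    rw [pvA_eq, find_all_sublists_alt]
    simp only [List.length_nil, beq_self_eq_true, if_true, Nat.cast_zero]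
    rw [PySem.List.pyRange_neg_one_eq_reverse]
    have hfull : (PySem.List.pyRange 0 ((lst.length : Int) - 0 + 1) 1).filter
        (fun i => decide (PySem.List.slice lst (some i) (some (i + 0)) = [])) =
        PySem.List.pyRange 0 ((lst.length : Int) - 0 + 1) 1 := by
      rw [List.filter_eq_self]
      intro i hi
      rw [PySem.List.mem_pyRange_one] at hi
      rw [add_zero, PySem.List.slice_toNat lst hi.1 hi.1]
      simp
    rw [hfull]
    norm_num
  · have hm' : 0 < sub.length := Nat.pos_of_ne_zero hm
    rw [pvA_eq, pvAsc_eq_ends lst sub hm', find_all_sublists_alt]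
    rw [if_neg (by simpa using hm)]
    have hinv0 : pvInv lst sub 0 [] := by
      intro j
      simp only [List.not_mem_nil, false_iff]
      rintro ⟨jn, rfl, h1, h2, hpart⟩
      rw [pvPartial_false_of_lt lst sub 0 jn (by omega)] at hpart
      exact Bool.false_ne_true hpart
    have h0 : PySem.List.enumerate lst 0 = PySem.List.enumerate (lst.drop 0) (((0 : Nat) : Int)) := by
      simp
    rw [h0, pvLoop lst sub hm' (lst.length - 0) 0 [] [] rfl (by omega) hinv0, List.nil_append]
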